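-- pv_equiv track=rewrite | github.com/serweryn617/AoC | 24/15/puzzle.py | adjust
-- ===== SOURCE A (Python) =====
-- def adjust(grid):
--     new_grid = []
--     for line in grid:
--         line = line.replace('.', '..')
--         line = line.replace('O', 'O.')
--         line = line.replace('@', '@.')
--         line = line.replace('#', '##')
--         new_grid.append(line)
--     return new_grid
-- ===== SOURCE B (Python) =====
-- def adjust(grid):
--     mapping = {'.': '..', 'O': 'O.', '@': '@.', '#': '##'}
--     return [''.join(mapping.get(c, c) for c in line) for line in grid]
-- ===== Notes on version B (the rewrite author's own statement) =====
-- stated objective: idiomatic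
-- what changed: Replaces four sequential full-string str.replace passes per line with a constant mapping dict built once and a single explicit per-character pass joining mapping.get(c, c); not faster in measurement.
import Mathlib
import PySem

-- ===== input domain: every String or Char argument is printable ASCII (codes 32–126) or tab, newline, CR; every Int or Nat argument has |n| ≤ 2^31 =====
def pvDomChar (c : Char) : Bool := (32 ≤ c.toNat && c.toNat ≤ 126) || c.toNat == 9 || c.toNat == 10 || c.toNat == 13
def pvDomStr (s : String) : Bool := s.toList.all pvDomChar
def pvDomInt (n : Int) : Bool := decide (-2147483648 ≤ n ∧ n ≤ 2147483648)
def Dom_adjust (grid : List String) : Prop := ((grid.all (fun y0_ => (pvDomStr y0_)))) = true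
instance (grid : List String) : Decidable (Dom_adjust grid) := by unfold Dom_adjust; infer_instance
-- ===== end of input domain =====

-- B replaces A's four sequential full-string replace passes per line with one
-- table-driven per-character pass (idiomatic; same measured cost).

-- ===== PORT A =====
def adjust (grid : List String) : List String :=
  grid.foldl (fun new_grid line =>
    let line1 := PySem.Str.replace line "." ".."
    let line2 := PySem.Str.replace line1 "O" "O."
    let line3 := PySem.Str.replace line2 "@" "@."
    let line4 := PySem.Str.replace line3 "#" "##"
    new_grid ++ [line4]) []

-- ===== PORT B =====
def adjustMapping : PySem.Dict Char String :=
  PySem.Dict.ofList [('.', ".."), ('O', "O."), ('@', "@."), ('#', "##")]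

def adjust_alt (grid : List String) : List String :=
  grid.map (fun line =>
    PySem.Str.join "" (line.toList.map (fun c =>
      PySem.Dict.getD adjustMapping c (String.ofList [c]))))

-- ===== PRECONDITION & SPEC =====
def Spec_adjust (grid : List String) (out : List String) : Prop := out = adjust_alt grid
instance (grid : List String) (out : List String) : Decidable (Spec_adjust grid out) := by unfold Spec_adjust; infer_instance

-- ===== CLAIM (what is proved, stated in full; the proofs are below) =====
def Claim_equal_adjust : Prop := ∀ (grid : List String), Dom_adjust grid → Spec_adjust grid (adjust grid)

-- ===== LEMMAS AND PROOFS =====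

def pvExpand (c : Char) : List Char :=
  if c = '.' then ['.', '.']
  else if c = 'O' then ['O', '.']
  else if c = '@' then ['@', '.']
  else if c = '#' then ['#', '#'] else [c]

theorem replace_go_single (a : Char) (new : List Char) :
    ∀ (s acc : List Char),
      PySem.Chars.replace.go [a] new s.length s acc
        = acc.reverse ++ s.flatMap (fun c => if c = a then new else [c]) := by
  intro s
  induction s with
  | nil => intro acc; simp [PySem.Chars.replace.go]
  | cons c t ih =>
    intro acc
    by_cases h : c = a
    · subst h
      simp [PySem.Chars.replace.go, List.isPrefixOf, ih]
    · simp [PySem.Chars.replace.go, List.isPrefixOf, beq_iff_eq, Ne.symm h, h, ih]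

theorem replace_single (s : List Char) (a : Char) (new : List Char) :
    PySem.Chars.replace s [a] new
      = s.flatMap (fun c => if c = a then new else [c]) := by
  simp [PySem.Chars.replace, replace_go_single]

theorem chain_eq (s : List Char) :
    PySem.Chars.replace
      (PySem.Chars.replace
        (PySem.Chars.replace
          (PySem.Chars.replace s ['.'] ['.', '.']) ['O'] ['O', '.'])
        ['@'] ['@', '.']) ['#'] ['#', '#']
      = s.flatMap pvExpand := by
  simp only [replace_single, List.flatMap_assoc]
  refine List.flatMap_congr (fun c _ => ?_)
  by_cases h1 : c = '.' <;> by_cases h2 : c = 'O' <;> by_cases h3 : c = '@' <;>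
    by_cases h4 : c = '#' <;> simp_all [pvExpand]

theorem getD_expand (c : Char) :
    (PySem.Dict.getD adjustMapping c (String.ofList [c])).toList = pvExpand c := by
  by_cases h1 : c = '.'
  · subst h1; decide
  by_cases h2 : c = 'O'
  · subst h2; decide
  by_cases h3 : c = '@'
  · subst h3; decide
  by_cases h4 : c = '#'
  · subst h4; decide
  have e1 : ('.' == c) = false := by simp; exact Ne.symm h1
  have e2 : ('O' == c) = false := by simp; exact Ne.symm h2
  have e3 : ('@' == c) = false := by simp; exact Ne.symm h3
  have e4 : ('#' == c) = false := by simp; exact Ne.symm h4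
  simp [adjustMapping, pvExpand, PySem.Dict.getD, PySem.Dict.get?,
    PySem.Dict.ofList, PySem.Dict.insert, PySem.Dict.empty, PySem.Dict.contains,
    PySem.Dict.update, List.find?, e1, e2, e3, e4, h1, h2, h3, h4,
    String.toList_ofList]

theorem intercalate_nil_flatten (l : List (List Char)) :
    List.intercalate ([] : List Char) l = l.flatten := by
  simp only [List.intercalate]
  induction l with
  | nil => rfl
  | cons x t ih =>
    cases t with
    | nil => simp
    | cons y u => simp_all [List.intersperse]

theorem line_eq (line : String) :
    PySem.Str.replace
      (PySem.Str.replace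
        (PySem.Str.replace (PySem.Str.replace line "." "..") "O" "O.") "@" "@.")
      "#" "##"
      = PySem.Str.join "" (line.toList.map (fun c =>
          PySem.Dict.getD adjustMapping c (String.ofList [c]))) := by
  apply String.toList_inj.mp
  simp only [PySem.Str.toList_join, PySem.Str.replace, String.toList_ofList,
    List.map_map, PySem.Chars.join]
  rw [show ("" : String).toList = ([] : List Char) from rfl, intercalate_nil_flatten,
    show (String.toList ∘ fun c => PySem.Dict.getD adjustMapping c (String.ofList [c]))
      = pvExpand from funext getD_expand]
  show PySem.Chars.replace
      (PySem.Chars.replace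
        (PySem.Chars.replace
          (PySem.Chars.replace line.toList ['.'] ['.', '.']) ['O'] ['O', '.'])
        ['@'] ['@', '.']) ['#'] ['#', '#'] = _
  rw [chain_eq, List.flatMap]

-- ===== VERDICT (by name: the statement is the Claim_ definition above) =====
theorem adjust_spec : Claim_equal_adjust := by
  intro grid _
  unfold Spec_adjust adjust adjust_alt
  rw [PySem.List.foldl_append_singleton_eq_map]
  exact List.map_congr_left (fun line _ => line_eq line)
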